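-- pv_equiv track=rewrite | github.com/Minghstar/aussie-scraper-api | parsers/sidearm_parser.py | parse_sidearm_fields
-- ===== SOURCE A (Python) =====
-- def parse_sidearm_fields(raw_fields):
--     # Example: "6-2 / Freshman / Sydney, Australia / St. Kevin's College"
--     parts = [part.strip() for part in raw_fields.split('/')]
--
--     height = year = hometown = high_school = None
--
--     if len(parts) == 4:
--         height, year, hometown, high_school = parts
--     elif len(parts) == 3:
--         height, year, hometown = parts
--     elif len(parts) == 2:
--         height, year = parts
--     elif len(parts) == 1:
--         height = parts[0]
--
--     return {
--         "height": height,
--         "year": year,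
--         "hometown": hometown,
--         "high_school": high_school,
--     }
-- ===== SOURCE B (Python) =====
-- def parse_sidearm_fields(raw_fields):
--     # Single left-to-right pass: repeatedly partition off the next '/'-field,
--     # returning as soon as the string is exhausted; no parts list is built.
--     keys = ("height", "year", "hometown", "high_school")
--     out = dict.fromkeys(keys)
--     rest = raw_fields
--     for key in keys:
--         head, sep, rest = rest.partition('/')
--         out[key] = head.strip()
--         if not sep:
--             return out
--     # a '/' remained after four fields: five or more parts, everything stays None
--     return dict.fromkeys(keys)
-- ===== Notes on version B (the rewrite author's own statement) =====
-- stated objective: alternative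
-- what changed: Instead of splitting the whole string into a parts list and branching on its length, B makes a single left-to-right pass that repeatedly partitions off the next slash-separated field into a preinitialised dict, returning early when the string is exhausted and resetting to all-None if a fifth field begins.
import Mathlib
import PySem

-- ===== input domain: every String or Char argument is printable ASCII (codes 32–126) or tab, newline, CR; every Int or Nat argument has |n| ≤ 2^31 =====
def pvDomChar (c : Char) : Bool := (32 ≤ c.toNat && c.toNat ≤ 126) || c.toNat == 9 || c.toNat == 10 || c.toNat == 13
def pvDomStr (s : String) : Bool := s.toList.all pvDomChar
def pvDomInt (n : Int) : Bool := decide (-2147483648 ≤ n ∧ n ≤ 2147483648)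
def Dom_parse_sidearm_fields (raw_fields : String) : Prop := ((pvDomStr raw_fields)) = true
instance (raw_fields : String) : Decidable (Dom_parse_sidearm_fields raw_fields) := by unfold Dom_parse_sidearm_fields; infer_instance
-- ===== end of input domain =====

-- B replaces A's split-into-a-list plus four-way length cascade by a single left-to-right
-- pass that repeatedly partitions off the next slash-separated field and returns early (objective: alternative).

-- ===== PORT A =====
def parse_sidearm_fields (raw_fields : String) : List (String × Option String) :=
  let parts := (PySem.Chars.splitOn raw_fields.toList ['/']).map (fun p => String.ofList (PySem.Chars.strip p))
  let t : Option String × Option String × Option String × Option String :=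
    if parts.length = 4 then (parts[0]?, parts[1]?, parts[2]?, parts[3]?)
    else if parts.length = 3 then (parts[0]?, parts[1]?, parts[2]?, none)
    else if parts.length = 2 then (parts[0]?, parts[1]?, none, none)
    else if parts.length = 1 then (parts[0]?, none, none, none)
    else (none, none, none, none)
  [("height", t.1), ("year", t.2.1), ("hometown", t.2.2.1), ("high_school", t.2.2.2)]

-- ===== PORT B =====
-- rest.partition('/') , ported by hand step for step (exact: first '/' splits; the Bool is
-- "a separator was found", i.e. Python's `sep == '/'` vs `sep == ''`).
def pbPartition : List Char → List Char × Bool × List Char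
  | [] => ([], false, [])
  | c :: r =>
    if c = '/' then ([], true, r)
    else
      match pbPartition r with
      | (h, f, t) => (c :: h, f, t)

def pbKeys : List String := ["height", "year", "hometown", "high_school"]

-- the `for key in keys` loop of Source B: sets out[key], early-returns when no separator remained;
-- `none` means the loop ran to completion (a '/' remained after four fields).
def pbLoop : List String → PySem.Dict String (Option String) → List Char →
    Option (PySem.Dict String (Option String))
  | [], _, _ => none
  | k :: ks, d, rest =>
    match pbPartition rest with
    | (head, found, r) =>
      let d' := d.insert k (some (String.ofList (PySem.Chars.strip head)))
      if found then pbLoop ks d' r else some d'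

def parse_sidearm_fields_alt (raw_fields : String) : List (String × Option String) :=
  let out := PySem.Dict.ofList (pbKeys.map (fun k => (k, (none : Option String))))
  match pbLoop pbKeys out raw_fields.toList with
  | some d => d.items
  | none => (PySem.Dict.ofList (pbKeys.map (fun k => (k, (none : Option String))))).items

-- ===== PRECONDITION & SPEC =====
def Spec_parse_sidearm_fields (raw_fields : String) (out : List (String × Option String)) : Prop := out = parse_sidearm_fields_alt raw_fields
instance (raw_fields : String) (out : List (String × Option String)) : Decidable (Spec_parse_sidearm_fields raw_fields out) := by unfold Spec_parse_sidearm_fields; infer_instance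

-- ===== CLAIM (what is proved, stated in full; the proofs are below) =====
def Claim_equal_parse_sidearm_fields : Prop := ∀ (raw_fields : String), Dom_parse_sidearm_fields raw_fields → Spec_parse_sidearm_fields raw_fields (parse_sidearm_fields raw_fields)

-- ===== LEMMAS AND PROOFS =====

-- structural characterisation of PySem.Chars.splitOn · ['/']
def pvConsHead (p : List Char) : List (List Char) → List (List Char)
  | [] => [p]
  | x :: xs => (p ++ x) :: xs

def pvSplit : List Char → List (List Char)
  | [] => [[]]
  | c :: r => if c = '/' then [] :: pvSplit r else pvConsHead [c] (pvSplit r)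

theorem pvSplit_ne_nil (l : List Char) : pvSplit l ≠ [] := by
  cases l with
  | nil => simp [pvSplit]
  | cons c r =>
    simp only [pvSplit]
    split_ifs
    · simp
    · cases h : pvSplit r <;> simp [pvConsHead]

theorem pvConsHead_nil (xs : List (List Char)) (h : xs ≠ []) : pvConsHead [] xs = xs := by
  cases xs with
  | nil => exact absurd rfl h
  | cons x t => simp [pvConsHead]

theorem pvConsHead_append (p q : List Char) (xs : List (List Char)) :
    pvConsHead (p ++ q) xs = pvConsHead p (pvConsHead q xs) := by
  cases xs <;> simp [pvConsHead, List.append_assoc]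

theorem pvGo_eq : ∀ (fuel : Nat) (l cur : List Char) (acc : List (List Char)),
    l.length ≤ fuel →
    PySem.Chars.splitOn.go ['/'] fuel l cur acc = acc.reverse ++ pvConsHead cur.reverse (pvSplit l) := by
  intro fuel
  induction fuel with
  | zero =>
    intro l cur acc h
    have : l = [] := by cases l <;> simp_all
    subst this
    simp [PySem.Chars.splitOn.go, pvSplit, pvConsHead]
  | succ n ih =>
    intro l cur acc h
    cases l with
    | nil => simp [PySem.Chars.splitOn.go, pvSplit, pvConsHead]
    | cons c rest =>
      by_cases hc : c = '/'
      · subst hc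
        have hpre : List.isPrefixOf ['/'] ('/' :: rest) = true := by
          simp [List.isPrefixOf]
        rw [PySem.Chars.splitOn.go]
        simp only [hpre, if_pos]
        rw [ih _ _ _ (by simpa using Nat.le_of_succ_le_succ h)]
        simp only [List.reverse_nil, List.length_singleton, List.drop_succ_cons, List.drop_zero]
        rw [pvConsHead_nil _ (pvSplit_ne_nil rest)]
        simp [pvSplit, pvConsHead]
      · have hpre : List.isPrefixOf ['/'] (c :: rest) = false := by
          simp [List.isPrefixOf]
          intro hh
          exact absurd hh.symm hc
        rw [PySem.Chars.splitOn.go]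
        simp only [hpre, Bool.false_eq_true, if_false]
        rw [ih _ _ _ (by simpa using Nat.le_of_succ_le_succ h)]
        simp only [pvSplit, hc, if_false, List.reverse_cons]
        rw [pvConsHead_append]

theorem splitOn_eq_pvSplit (s : List Char) : PySem.Chars.splitOn s ['/'] = pvSplit s := by
  unfold PySem.Chars.splitOn
  rw [pvGo_eq _ _ _ _ (by omega)]
  simp [pvConsHead_nil _ (pvSplit_ne_nil s)]

theorem pvSplit_partition (s : List Char) :
    pvSplit s = (match pbPartition s with
                 | (h, true, r) => h :: pvSplit r
                 | (h, false, _) => [h]) := by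
  induction s with
  | nil => simp [pvSplit, pbPartition]
  | cons c r ih =>
    by_cases hc : c = '/'
    · subst hc; simp [pvSplit, pbPartition]
    · simp only [pvSplit, hc, if_false, pbPartition]
      rcases hp : pbPartition r with ⟨h, f, t⟩
      rw [hp] at ih
      cases f
      · simp only at ih
        simp [ih, pvConsHead]
      · simp only at ih
        simp [ih, pvConsHead]

-- ===== VERDICT (by name: the statement is the Claim_ definition above) =====
theorem parse_sidearm_fields_spec : Claim_equal_parse_sidearm_fields := by
  intro raw _
  show parse_sidearm_fields raw = parse_sidearm_fields_alt raw
  simp only [parse_sidearm_fields, parse_sidearm_fields_alt, splitOn_eq_pvSplit]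
  rcases h1 : pbPartition raw.toList with ⟨a1, f1, r1⟩
  have e1 := pvSplit_partition raw.toList
  rw [h1] at e1
  cases f1 with
  | false =>
    simp only at e1
    simp [pbKeys, pbLoop, h1, e1]
    rfl
  | true =>
    simp only at e1
    rcases h2 : pbPartition r1 with ⟨a2, f2, r2⟩
    have e2 := pvSplit_partition r1
    rw [h2] at e2
    cases f2 with
    | false =>
      simp only at e2
      simp [pbKeys, pbLoop, h1, h2, e1, e2]
      rfl
    | true =>
      simp only at e2
      rcases h3 : pbPartition r2 with ⟨a3, f3, r3⟩
      have e3 := pvSplit_partition r2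
      rw [h3] at e3
      cases f3 with
      | false =>
        simp only at e3
        simp [pbKeys, pbLoop, h1, h2, h3, e1, e2, e3]
        rfl
      | true =>
        simp only at e3
        rcases h4 : pbPartition r3 with ⟨a4, f4, r4⟩
        have e4 := pvSplit_partition r3
        rw [h4] at e4
        cases f4 with
        | false =>
          simp only at e4
          simp [pbKeys, pbLoop, h1, h2, h3, h4, e1, e2, e3, e4]
          rfl
        | true =>
          simp only at e4
          -- five or more parts: both sides are the all-None record
          have hlen : 5 ≤ (pvSplit raw.toList).length := by
            have := pvSplit_ne_nil r4
            rw [e1, e2, e3, e4]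
            cases hr : pvSplit r4 with
            | nil => exact absurd hr this
            | cons x xs => simp
          simp only [pbKeys, pbLoop, h1, h2, h3, h4]
          rw [List.length_map]
          rw [if_neg (by omega), if_neg (by omega), if_neg (by omega), if_neg (by omega)]
          rfl
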